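-- pv_equiv track=rewrite | github.com/Sologa/NLP_PRISMA_Reviews | scripts/download/manual_single_round_retry.py | prioritize_candidates
-- ===== SOURCE A (Python) =====
-- from typing import Dict, List, Tuple
--
-- def prioritize_candidates(urls: List[str], max_candidates: int = 12) -> List[str]:
--     direct_pdf: List[str] = []
--     publisher_pdf: List[str] = []
--     generic: List[str] = []
--     weak: List[str] = []
--     for u in urls:
--         ul = u.lower()
--         if (
--             ul.endswith(".pdf")
--             or "/pdf" in ul
--             or "download" in ul
--             or "blobtype=pdf" in ul
--             or "type=printable" in ul
--         ):
--             direct_pdf.append(u)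
--             continue
--         if any(host in ul for host in ["doi.org/", "arxiv.org/abs/", "arxiv.org/pdf/", "aclanthology.org/", "openreview.net/"]):
--             publisher_pdf.append(u)
--             continue
--         if any(host in ul for host in ["semanticscholar.org/paper/", "pubmed.ncbi.nlm.nih.gov/"]):
--             weak.append(u)
--             continue
--         generic.append(u)
--     ranked = direct_pdf + publisher_pdf + generic + weak
--     return ranked[:max_candidates]
-- ===== SOURCE B (Python) =====
-- from typing import List
--
-- _PUBLISHER_HOSTS = ["doi.org/", "arxiv.org/abs/", "arxiv.org/pdf/", "aclanthology.org/", "openreview.net/"]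
-- _WEAK_HOSTS = ["semanticscholar.org/paper/", "pubmed.ncbi.nlm.nih.gov/"]
--
-- def _priority(u: str) -> int:
--     ul = u.lower()
--     if (
--         ul.endswith(".pdf")
--         or "/pdf" in ul
--         or "download" in ul
--         or "blobtype=pdf" in ul
--         or "type=printable" in ul
--     ):
--         return 0
--     if any(host in ul for host in _PUBLISHER_HOSTS):
--         return 1
--     if any(host in ul for host in _WEAK_HOSTS):
--         return 3
--     return 2
--
-- def prioritize_candidates(urls: List[str], max_candidates: int = 12) -> List[str]:
--     return sorted(urls, key=_priority)[:max_candidates]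
-- ===== Notes on version B (the rewrite author's own statement) =====
-- stated objective: simpler
-- what changed: Replaced the four explicit bucket lists and the if/continue partition loop by a single priority-key classifier (0-3) plus one stable sort and a slice.
import Mathlib
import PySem

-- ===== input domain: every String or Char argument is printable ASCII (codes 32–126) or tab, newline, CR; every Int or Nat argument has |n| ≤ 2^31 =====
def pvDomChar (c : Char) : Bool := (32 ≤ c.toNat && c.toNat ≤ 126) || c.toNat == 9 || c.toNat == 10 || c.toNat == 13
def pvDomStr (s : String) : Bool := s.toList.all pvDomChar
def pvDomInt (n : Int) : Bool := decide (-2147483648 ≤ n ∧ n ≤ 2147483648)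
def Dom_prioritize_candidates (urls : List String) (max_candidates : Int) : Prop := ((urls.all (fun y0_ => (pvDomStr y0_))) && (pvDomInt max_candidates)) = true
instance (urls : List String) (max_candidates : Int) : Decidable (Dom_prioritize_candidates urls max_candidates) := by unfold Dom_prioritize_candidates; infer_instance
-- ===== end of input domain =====

-- B replaces A's four explicit bucket lists and if/continue partition by a single
-- priority-key classifier plus one stable sort (objective: simpler decomposition).

-- ===== PORT A =====
-- loop body of A's for-loop over urls; state = (direct_pdf, publisher_pdf, generic, weak)
def pvStepA (acc : List String × List String × List String × List String) (u : String) :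
    List String × List String × List String × List String :=
  let ul := PySem.Str.lower u
  if PySem.Str.endswith ul ".pdf" || PySem.Str.isIn "/pdf" ul || PySem.Str.isIn "download" ul
      || PySem.Str.isIn "blobtype=pdf" ul || PySem.Str.isIn "type=printable" ul then
    (acc.1 ++ [u], acc.2.1, acc.2.2.1, acc.2.2.2)
  else if (["doi.org/", "arxiv.org/abs/", "arxiv.org/pdf/", "aclanthology.org/", "openreview.net/"]).any
      (fun host => PySem.Str.isIn host ul) then
    (acc.1, acc.2.1 ++ [u], acc.2.2.1, acc.2.2.2)
  else if (["semanticscholar.org/paper/", "pubmed.ncbi.nlm.nih.gov/"]).any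
      (fun host => PySem.Str.isIn host ul) then
    (acc.1, acc.2.1, acc.2.2.1, acc.2.2.2 ++ [u])
  else
    (acc.1, acc.2.1, acc.2.2.1 ++ [u], acc.2.2.2)

def prioritize_candidates (urls : List String) (max_candidates : Int) : List String :=
  let r := urls.foldl pvStepA ([], [], [], [])
  let ranked := r.1 ++ r.2.1 ++ r.2.2.1 ++ r.2.2.2
  PySem.List.slice ranked none (some max_candidates)

-- ===== PORT B =====
-- B's _priority: maps a url to its rank 0..3 (generic = 2, weak hosts = 3)
def pvPriority (u : String) : Nat :=
  let ul := PySem.Str.lower u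
  if PySem.Str.endswith ul ".pdf" || PySem.Str.isIn "/pdf" ul || PySem.Str.isIn "download" ul
      || PySem.Str.isIn "blobtype=pdf" ul || PySem.Str.isIn "type=printable" ul then 0
  else if (["doi.org/", "arxiv.org/abs/", "arxiv.org/pdf/", "aclanthology.org/", "openreview.net/"]).any
      (fun host => PySem.Str.isIn host ul) then 1
  else if (["semanticscholar.org/paper/", "pubmed.ncbi.nlm.nih.gov/"]).any
      (fun host => PySem.Str.isIn host ul) then 3
  else 2

def prioritize_candidates_alt (urls : List String) (max_candidates : Int) : List String :=
  PySem.List.slice (PySem.List.sorted urls pvPriority false) none (some max_candidates)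

-- ===== PRECONDITION & SPEC =====
def Spec_prioritize_candidates (urls : List String) (max_candidates : Int) (out : List String) : Prop := out = prioritize_candidates_alt urls max_candidates
instance (urls : List String) (max_candidates : Int) (out : List String) : Decidable (Spec_prioritize_candidates urls max_candidates out) := by unfold Spec_prioritize_candidates; infer_instance

-- ===== CLAIM (what is proved, stated in full; the proofs are below) =====
def Claim_equal_prioritize_candidates : Prop := ∀ (urls : List String) (max_candidates : Int), Dom_prioritize_candidates urls max_candidates → Spec_prioritize_candidates urls max_candidates (prioritize_candidates urls max_candidates)

-- ===== LEMMAS AND PROOFS =====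

-- the bucket of rank i, as a filter
def pvF (i : Nat) (xs : List String) : List String := xs.filter (fun u => pvPriority u == i)

lemma pvPriority_cases (u : String) :
    pvPriority u = 0 ∨ pvPriority u = 1 ∨ pvPriority u = 2 ∨ pvPriority u = 3 := by
  unfold pvPriority; dsimp only; split_ifs <;> simp

-- inserting x between a prefix of keys ≤ its own and a suffix of strictly larger keys
lemma pv_insertBy_split (x : String) (l1 l2 : List String)
    (h1 : ∀ y ∈ l1, ¬ pvPriority x < pvPriority y)
    (h2 : ∀ y ∈ l2, pvPriority x < pvPriority y) :
    PySem.List.insertBy (fun a b => decide (pvPriority a < pvPriority b)) x (l1 ++ l2)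
      = l1 ++ x :: l2 := by
  induction l1 with
  | nil =>
    cases l2 with
    | nil => rfl
    | cons y ys =>
        have hy : pvPriority x < pvPriority y := h2 y (by simp)
        simp [PySem.List.insertBy, hy]
  | cons a t ih =>
    have ha : ¬ pvPriority x < pvPriority a := h1 a (by simp)
    simp only [List.cons_append, PySem.List.insertBy]
    rw [if_neg (by simpa using ha)]
    simp only [List.cons.injEq, true_and]
    exact ih (fun y hy => h1 y (by simp [hy]))

-- the stable sort by pvPriority is the concatenation of the four rank buckets
lemma pv_sorted_buckets (xs : List String) :
    PySem.List.sorted xs pvPriority false = pvF 0 xs ++ pvF 1 xs ++ pvF 2 xs ++ pvF 3 xs := by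
  rw [PySem.List.sorted_eq_foldl_insertBy]
  induction xs using List.reverseRecOn with
  | nil => simp [pvF]
  | append_singleton xs x ih =>
    rw [List.foldl_append, List.foldl_cons, List.foldl_nil, ih]
    have hmem : ∀ (i : Nat) (y : String), y ∈ pvF i xs → pvPriority y = i := by
      intro i y hy
      have := (List.mem_filter.mp hy).2
      simpa using this
    have hfilt : ∀ (i : Nat), pvF i (xs ++ [x]) = pvF i xs ++ (if pvPriority x = i then [x] else []) := by
      intro i
      by_cases h : pvPriority x = i <;>
        simp [pvF, List.filter_append, h]
    rcases pvPriority_cases x with h | h | h | h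
    · rw [show pvF 0 xs ++ pvF 1 xs ++ pvF 2 xs ++ pvF 3 xs
          = pvF 0 xs ++ (pvF 1 xs ++ pvF 2 xs ++ pvF 3 xs) by simp,
        pv_insertBy_split x _ _
          (fun y hy => by have := hmem 0 y hy; omega)
          (fun y hy => by
            rcases List.mem_append.mp hy with hy' | hy'
            · rcases List.mem_append.mp hy' with h'' | h''
              · have := hmem 1 y h''; omega
              · have := hmem 2 y h''; omega
            · have := hmem 3 y hy'; omega)]
      simp [hfilt, h]
    · rw [show pvF 0 xs ++ pvF 1 xs ++ pvF 2 xs ++ pvF 3 xs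
          = (pvF 0 xs ++ pvF 1 xs) ++ (pvF 2 xs ++ pvF 3 xs) by simp,
        pv_insertBy_split x _ _
          (fun y hy => by
            rcases List.mem_append.mp hy with hy' | hy'
            · have := hmem 0 y hy'; omega
            · have := hmem 1 y hy'; omega)
          (fun y hy => by
            rcases List.mem_append.mp hy with hy' | hy'
            · have := hmem 2 y hy'; omega
            · have := hmem 3 y hy'; omega)]
      simp [hfilt, h]
    · rw [show pvF 0 xs ++ pvF 1 xs ++ pvF 2 xs ++ pvF 3 xs
          = (pvF 0 xs ++ pvF 1 xs ++ pvF 2 xs) ++ pvF 3 xs by simp,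
        pv_insertBy_split x _ _
          (fun y hy => by
            rcases List.mem_append.mp hy with hy' | hy'
            · rcases List.mem_append.mp hy' with h'' | h''
              · have := hmem 0 y h''; omega
              · have := hmem 1 y h''; omega
            · have := hmem 2 y hy'; omega)
          (fun y hy => by have := hmem 3 y hy; omega)]
      simp [hfilt, h]
    · rw [show pvF 0 xs ++ pvF 1 xs ++ pvF 2 xs ++ pvF 3 xs
          = (pvF 0 xs ++ pvF 1 xs ++ pvF 2 xs ++ pvF 3 xs) ++ [] by simp,
        pv_insertBy_split x _ _
          (fun y hy => by
            rcases List.mem_append.mp hy with hy' | hy'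
            · rcases List.mem_append.mp hy' with h'' | h''
              · rcases List.mem_append.mp h'' with h3 | h3
                · have := hmem 0 y h3; omega
                · have := hmem 1 y h3; omega
              · have := hmem 2 y h''; omega
            · have := hmem 3 y hy'; omega)
          (fun y hy => by simp at hy)]
      simp [hfilt, h]

-- A's partition loop fills exactly the four rank buckets
lemma pv_foldA (xs : List String) : ∀ (d p g w : List String),
    xs.foldl pvStepA (d, p, g, w)
      = (d ++ pvF 0 xs, p ++ pvF 1 xs, g ++ pvF 2 xs, w ++ pvF 3 xs) := by
  induction xs with
  | nil => intro d p g w; simp [pvF]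
  | cons x t ih =>
    intro d p g w
    rw [List.foldl_cons]
    by_cases h1 : (PySem.Str.endswith (PySem.Str.lower x) ".pdf"
        || PySem.Str.isIn "/pdf" (PySem.Str.lower x) || PySem.Str.isIn "download" (PySem.Str.lower x)
        || PySem.Str.isIn "blobtype=pdf" (PySem.Str.lower x)
        || PySem.Str.isIn "type=printable" (PySem.Str.lower x)) = true
    · have hp : pvPriority x = 0 := by unfold pvPriority; dsimp only; rw [if_pos h1]
      have hstep : pvStepA (d, p, g, w) x = (d ++ [x], p, g, w) := by
        unfold pvStepA; dsimp only; rw [if_pos h1]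
      rw [hstep, ih]
      simp [pvF, hp]
    · by_cases h2 : ((["doi.org/", "arxiv.org/abs/", "arxiv.org/pdf/", "aclanthology.org/", "openreview.net/"]).any
          (fun host => PySem.Str.isIn host (PySem.Str.lower x))) = true
      · have hp : pvPriority x = 1 := by unfold pvPriority; dsimp only; rw [if_neg h1, if_pos h2]
        have hstep : pvStepA (d, p, g, w) x = (d, p ++ [x], g, w) := by
          unfold pvStepA; dsimp only; rw [if_neg h1, if_pos h2]
        rw [hstep, ih]
        simp [pvF, hp]
      · by_cases h3 : ((["semanticscholar.org/paper/", "pubmed.ncbi.nlm.nih.gov/"]).any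
            (fun host => PySem.Str.isIn host (PySem.Str.lower x))) = true
        · have hp : pvPriority x = 3 := by unfold pvPriority; dsimp only; rw [if_neg h1, if_neg h2, if_pos h3]
          have hstep : pvStepA (d, p, g, w) x = (d, p, g, w ++ [x]) := by
            unfold pvStepA; dsimp only; rw [if_neg h1, if_neg h2, if_pos h3]
          rw [hstep, ih]
          simp [pvF, hp]
        · have hp : pvPriority x = 2 := by unfold pvPriority; dsimp only; rw [if_neg h1, if_neg h2, if_neg h3]
          have hstep : pvStepA (d, p, g, w) x = (d, p, g ++ [x], w) := by
            unfold pvStepA; dsimp only; rw [if_neg h1, if_neg h2, if_neg h3]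
          rw [hstep, ih]
          simp [pvF, hp]

-- ===== VERDICT (by name: the statement is the Claim_ definition above) =====
theorem prioritize_candidates_spec : Claim_equal_prioritize_candidates := by
  intro urls max_candidates _
  unfold Spec_prioritize_candidates prioritize_candidates prioritize_candidates_alt
  rw [pv_foldA urls [] [] [] [], pv_sorted_buckets urls]
  simp
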